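-- pv_equiv track=rewrite | github.com/pbberlin/ecb-monitor-website | scripts/crawl-01.py | spaceVariants
-- ===== SOURCE A (Python) =====
-- def spaceVariants(nm: str):
--     exoticSpaces = [" ", "\u00A0", "\u202F"]
--     exoticSpaces = [" "]
--
--     variations = []
--     for sp in exoticSpaces:
--         parts = nm.split(" ")
--         if len(parts) >= 2:
--             rebuilt = sp.join(parts)
--             variations.append(rebuilt)
--         else:
--             variations.append(nm)
--
--     return variations
-- ===== SOURCE B (Python) =====
-- def spaceVariants(nm: str):
--     # The loop in A runs over exoticSpaces == [" "] only, and " ".join(nm.split(" "))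
--     # (or the else-branch) always reproduces nm, so the result is just [nm].
--     return [nm]
-- ===== Notes on version B (the rewrite author's own statement) =====
-- stated objective: simpler
-- what changed: A's loop over the (reassigned) single-element space list with split/join is an identity, so B returns the closed-form result [nm] with no loop, split or join.
import Mathlib
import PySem

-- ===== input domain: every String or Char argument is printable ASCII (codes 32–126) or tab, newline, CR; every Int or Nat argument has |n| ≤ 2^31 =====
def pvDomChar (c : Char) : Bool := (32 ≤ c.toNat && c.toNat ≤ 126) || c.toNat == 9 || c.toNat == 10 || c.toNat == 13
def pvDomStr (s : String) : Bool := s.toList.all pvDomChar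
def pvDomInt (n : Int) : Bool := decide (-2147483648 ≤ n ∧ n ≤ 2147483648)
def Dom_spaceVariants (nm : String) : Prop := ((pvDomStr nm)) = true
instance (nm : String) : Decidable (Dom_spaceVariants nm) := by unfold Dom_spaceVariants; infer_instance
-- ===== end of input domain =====

-- B replaces A's one-iteration split/join loop by its closed-form result [nm] (simpler).

-- ===== PORT A =====
def spaceVariants (nm : String) : List String :=
  -- exoticSpaces = [" ", "\u00A0", "\u202F"]; exoticSpaces = [" "]
  let exoticSpaces : List String := [" "]
  exoticSpaces.foldl
    (fun variations sp =>
      -- nm.split(" "): sep is the nonempty literal " ", so Python's split never raises;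
      -- PySem.Str.split? would return `some` of exactly this list (PySem.Chars.splitOn).
      let parts : List String := (PySem.Chars.splitOn nm.toList [' ']).map String.ofList
      -- both branches append one element to variations; the branch picks the element
      let appended : String := if parts.length ≥ 2 then PySem.Str.join sp parts else nm
      variations ++ [appended])
    []

-- ===== PORT B =====
def spaceVariants_alt (nm : String) : List String := [nm]

-- ===== PRECONDITION & SPEC =====
def Spec_spaceVariants (nm : String) (out : List String) : Prop := out = spaceVariants_alt nm
instance (nm : String) (out : List String) : Decidable (Spec_spaceVariants nm out) := by unfold Spec_spaceVariants; infer_instance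

-- ===== CLAIM (what is proved, stated in full; the proofs are below) =====
def Claim_equal_spaceVariants : Prop := ∀ (nm : String), Dom_spaceVariants nm → Spec_spaceVariants nm (spaceVariants nm)

-- ===== LEMMAS AND PROOFS =====

theorem inter_cons_cons (sep a b : List Char) (xs : List (List Char)) :
    sep.intercalate (a :: b :: xs) = a ++ sep ++ sep.intercalate (b :: xs) := by
  simp [List.intercalate, List.intersperse]

theorem inter_snoc2 (sep a b : List Char) (xs : List (List Char)) :
    sep.intercalate (xs ++ [a, b]) = sep.intercalate (xs ++ [a ++ sep ++ b]) := by
  induction xs with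
  | nil => simp [List.intercalate, List.intersperse]
  | cons x ys ih =>
      cases ys with
      | nil => simp [List.intercalate]
      | cons y zs =>
          simp only [List.cons_append, inter_cons_cons] at *
          rw [ih]

-- splitOn.go invariant: joining back with the separator reconstructs the pending input
theorem go_inv (sep : List Char) (hsep : sep ≠ []) :
    ∀ (fuel : Nat) (l cur : List Char) (acc : List (List Char)), l.length ≤ fuel →
      sep.intercalate (PySem.Chars.splitOn.go sep fuel l cur acc)
        = sep.intercalate (acc.reverse ++ [cur.reverse ++ l]) := by
  intro fuel
  induction fuel with
  | zero =>
      intro l cur acc hl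
      have : l = [] := List.eq_nil_of_length_eq_zero (Nat.le_zero.mp hl)
      subst this
      simp [PySem.Chars.splitOn.go]
  | succ f ih =>
      intro l cur acc hl
      cases l with
      | nil => simp [PySem.Chars.splitOn.go]
      | cons c rest =>
          rw [PySem.Chars.splitOn.go]
          by_cases hp : sep.isPrefixOf (c :: rest) = true
          · rw [if_pos hp]
            have hlen : (List.drop sep.length (c :: rest)).length ≤ f := by
              have hs1 : 0 < sep.length := List.length_pos_of_ne_nil hsep
              simp only [List.length_drop, List.length_cons] at *
              omega
            rw [ih _ _ _ hlen]
            obtain ⟨t, ht⟩ := List.isPrefixOf_iff_prefix.mp hp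
            have hd : List.drop sep.length (c :: rest) = t := by
              rw [← ht]; simp
            rw [hd, ← ht]
            have h2 := inter_snoc2 sep cur.reverse t acc.reverse
            simp only [List.reverse_cons]
            simpa [List.append_assoc] using h2
          · rw [if_neg hp]
            have : rest.length ≤ f := by simp at hl; omega
            rw [ih _ _ _ this]
            simp

-- joining a split on " " back with " " is the identity
theorem inter_splitOn_space (cs : List Char) :
    List.intercalate [' '] (PySem.Chars.splitOn cs [' ']) = cs := by
  unfold PySem.Chars.splitOn
  rw [go_inv [' '] (by simp) _ _ _ _ (by omega)]
  simp [List.intercalate]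

-- ===== VERDICT (by name: the statement is the Claim_ definition above) =====
theorem spaceVariants_spec : Claim_equal_spaceVariants := by
  intro nm _
  unfold Spec_spaceVariants spaceVariants spaceVariants_alt
  simp only [List.foldl, List.nil_append]
  split
  · rw [PySem.Str.join]
    rw [PySem.Chars.join]
    have : (List.map String.toList ((PySem.Chars.splitOn nm.toList [' ']).map String.ofList))
        = PySem.Chars.splitOn nm.toList [' '] := by
      simp [List.map_map, Function.comp_def]
    rw [this]
    have hsep : (" " : String).toList = [' '] := rfl
    rw [hsep, inter_splitOn_space]
    simp
  · rfl
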